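-- pv_equiv track=rewrite | github.com/mytran2111/Coding-Practice | naq202/ICPC/lockout/i.py | op2
-- ===== SOURCE A (Python) =====
-- def op2(n,p):
--     if p < n -1 :
--         return []
--     l = []
--     t = 0
--     c = 1
--
--     for i in range(n-1,0,-1):
--         c += 1
--
--         if (t+c+i-1 >= p):
--             r = p -t -i +1
--             l.append(r)
--             for k in range(i-1):
--                l.append(1)
--             t = p
--             break
--         t += c
--         l.append(c)
--
--     if t < p:
--         return []
--     return l
-- ===== SOURCE B (Python) =====
-- def op2(n, p):
--     # No valid partition: too few, or even 2+3+...+n (= n*(n+1)//2 - 1) falls short.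
--     if n < 2 or p < n - 1 or (n - 1) * n // 2 + n - 1 < p:
--         return []
--     q = p - n + 1
--     # binary search: smallest m in [1, n-1] with m*(m+1)//2 >= q
--     lo, hi = 1, n - 1
--     while lo < hi:
--         mid = (lo + hi) // 2
--         if mid * (mid + 1) // 2 >= q:
--             hi = mid
--         else:
--             lo = mid + 1
--     m = lo
--     r = p - m * (m + 1) // 2 - n + m + 2
--     return list(range(2, m + 1)) + [r] + [1] * (n - m - 1)
-- ===== Notes on version B (the rewrite author's own statement) =====
-- stated objective: alternative
-- what changed: A scans linearly with a running sum to find where the break fires; B checks feasibility with a closed-form total, binary-searches for the smallest break index m, and constructs the result directly as range(2,m+1) + [r] + [1]*(n-m-1).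
import Mathlib
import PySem

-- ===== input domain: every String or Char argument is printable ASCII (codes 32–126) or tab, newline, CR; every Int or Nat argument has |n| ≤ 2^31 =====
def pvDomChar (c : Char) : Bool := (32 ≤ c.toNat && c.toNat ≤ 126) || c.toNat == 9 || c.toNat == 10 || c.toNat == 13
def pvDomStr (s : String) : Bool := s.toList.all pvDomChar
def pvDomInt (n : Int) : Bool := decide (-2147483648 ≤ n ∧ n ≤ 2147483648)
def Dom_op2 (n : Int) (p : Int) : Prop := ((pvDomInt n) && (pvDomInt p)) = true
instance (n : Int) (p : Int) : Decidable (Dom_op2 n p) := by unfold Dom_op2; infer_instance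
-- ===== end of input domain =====

-- B replaces A's linear scan for the break position by a binary search for the
-- smallest valid break index plus direct closed-form construction of the list
-- (objective: alternative decomposition).

-- ===== PORT A =====
-- the for-loop of A, with `break` modelled by returning early; state = (l, t, c)
def op2_loopA (p : Int) : List Int → List Int → Int → Int → List Int × Int
  | [], l, t, _ => (l, t)
  | i :: is, l, t, c =>
    -- c += 1
    if t + (c + 1) + i - 1 ≥ p then
      -- r = p - t - i + 1 ; l.append(r); for k in range(i-1): l.append(1); t = p; break
      ((PySem.List.pyRange 0 (i - 1) 1).foldl (fun acc _ => acc ++ [(1 : Int)])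
         (l ++ [p - t - i + 1]), p)
    else
      op2_loopA p is (l ++ [c + 1]) (t + (c + 1)) (c + 1)

def op2 (n : Int) (p : Int) : List Int :=
  if p < n - 1 then []
  else
    let res := op2_loopA p (PySem.List.pyRange (n - 1) 0 (-1)) [] 0 1
    if res.2 < p then [] else res.1

-- ===== PORT B =====
-- binary search: smallest m in [lo, hi] with m*(m+1)//2 >= q (assuming it holds at hi)
def op2_bsearch (q : Int) (lo hi : Int) : Int :=
  if h : lo < hi then
    let mid := PySem.Int.floordiv (lo + hi) 2
    if PySem.Int.floordiv (mid * (mid + 1)) 2 ≥ q then op2_bsearch q lo mid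
    else op2_bsearch q (mid + 1) hi
  else lo
termination_by (hi - lo).toNat
decreasing_by
  · have h2 : PySem.Int.floordiv (lo + hi) 2 < hi := by
      rw [PySem.Int.floordiv_lt_iff_lt_mul (by norm_num : (0:Int) < 2)]; omega
    omega
  · have h1 := (PySem.Int.floordiv_two_mid_bounds (le_of_lt h)).1
    omega

def op2_alt (n : Int) (p : Int) : List Int :=
  if n < 2 ∨ p < n - 1 ∨ PySem.Int.floordiv ((n - 1) * n) 2 + n - 1 < p then []
  else
    let q := p - n + 1
    let m := op2_bsearch q 1 (n - 1)
    let r := p - PySem.Int.floordiv (m * (m + 1)) 2 - n + m + 2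
    PySem.List.pyRange 2 (m + 1) 1 ++ [r] ++ List.replicate (n - m - 1).toNat 1

-- ===== PRECONDITION & SPEC =====
def Spec_op2 (n : Int) (p : Int) (out : List Int) : Prop := out = op2_alt n p
instance (n : Int) (p : Int) (out : List Int) : Decidable (Spec_op2 n p out) := by unfold Spec_op2; infer_instance

-- ===== CLAIM (what is proved, stated in full; the proofs are below) =====
def Claim_equal_op2 : Prop := ∀ (n : Int) (p : Int), Dom_op2 n p → Spec_op2 n p (op2 n p)

-- ===== LEMMAS AND PROOFS =====

-- m*(m+1) is even, so twice its floordiv by 2 gives it back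
lemma op2_two_fdiv (m : Int) : 2 * PySem.Int.floordiv (m * (m + 1)) 2 = m * (m + 1) := by
  rw [PySem.Int.floordiv_eq_ediv_of_pos (by norm_num : (0:Int) < 2)]
  obtain ⟨k, hk⟩ := Int.even_mul_succ_self m
  omega

lemma op2_tri_mono (a b : Int) (h1 : 0 ≤ a) (h2 : a ≤ b) : a * (a + 1) ≤ b * (b + 1) := by
  nlinarith

-- correctness of the binary search
lemma op2_bsearch_spec (q : Int) : ∀ (k : Nat) (lo hi : Int), (hi - lo).toNat = k → lo ≤ hi →
    2 * q ≤ hi * (hi + 1) →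
    (lo ≤ op2_bsearch q lo hi ∧ op2_bsearch q lo hi ≤ hi ∧
     2 * q ≤ op2_bsearch q lo hi * (op2_bsearch q lo hi + 1) ∧
     (op2_bsearch q lo hi = lo ∨ (op2_bsearch q lo hi - 1) * op2_bsearch q lo hi < 2 * q)) := by
  intro k
  induction k using Nat.strong_induction_on with
  | _ k ih =>
    intro lo hi hk hle hhi
    rw [op2_bsearch]
    by_cases h : lo < hi
    · rw [dif_pos h]
      have hmlo := (PySem.Int.floordiv_two_mid_bounds (le_of_lt h)).1
      have hmhi : PySem.Int.floordiv (lo + hi) 2 < hi := by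
        rw [PySem.Int.floordiv_lt_iff_lt_mul (by norm_num : (0:Int) < 2)]; omega
      set mid := PySem.Int.floordiv (lo + hi) 2 with hmid
      have hfd := op2_two_fdiv mid
      by_cases hc : PySem.Int.floordiv (mid * (mid + 1)) 2 ≥ q
      · rw [if_pos hc]
        obtain ⟨g1, g2, g3, g4⟩ :=
          ih (mid - lo).toNat (by omega) lo mid rfl (by omega) (by omega)
        exact ⟨g1, by omega, g3, g4⟩
      · rw [if_neg hc]
        obtain ⟨g1, g2, g3, g4⟩ :=
          ih (hi - (mid + 1)).toNat (by omega) (mid + 1) hi rfl (by omega) hhi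
        refine ⟨by omega, g2, g3, ?_⟩
        rcases g4 with h1 | h1
        · right; rw [h1]
          have e : mid + 1 - 1 = mid := by omega
          rw [e]; omega
        · right; exact h1
    · rw [dif_neg h]
      have heq : lo = hi := le_antisymm hle (not_lt.mp h)
      subst heq
      exact ⟨le_refl _, le_refl _, hhi, Or.inl rfl⟩

-- appending 1 for each element of a list is appending replicate-length-many 1s
lemma op2_foldl_ones (xs : List Int) : ∀ (l : List Int),
    xs.foldl (fun acc _ => acc ++ [(1 : Int)]) l = l ++ List.replicate xs.length 1 := by
  induction xs with
  | nil => intro l; simp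
  | cons x xs ih =>
    intro l
    simp only [List.foldl_cons, List.length_cons, ih]
    rw [List.append_assoc]
    simp [List.replicate_succ]

-- A's loop when the break fires at index m (the least valid break point)
lemma op2_loopA_break : ∀ (iN : Nat) (i c t p m : Int) (l : List Int), i = (iN : Int) →
    2 * t = c * (c + 1) - 2 →
    c ≤ m → m ≤ c + i - 1 →
    2 * p ≤ m * (m + 1) + 2 * (c + i) - 2 →
    (∀ k, c ≤ k → k < m → k * (k + 1) + 2 * (c + i) - 2 < 2 * p) →
    op2_loopA p (PySem.List.pyRange i 0 (-1)) l t c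
      = (l ++ PySem.List.pyRange (c + 1) (m + 1) 1
           ++ (p - (PySem.Int.floordiv (m * (m + 1)) 2 - 1) - (c + i - m) + 1)
              :: List.replicate (c + i - m - 1).toNat 1, p) := by
  intro iN
  induction iN with
  | zero => intro i c t p m l hi _ h1 h2 _ _; omega
  | succ k ih =>
    intro i c t p m l hi hinv hcm hmi hbrk hleast
    have hipos : (0 : Int) < i := by omega
    rw [PySem.List.pyRange_neg_one_cons hipos]
    by_cases hm : m = c
    · -- break fires now
      subst hm
      have hfd := op2_two_fdiv m
      simp only [op2_loopA, if_pos (show t + (m + 1) + i - 1 ≥ p by omega)]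
      have hr : p - t - i + 1
          = p - (PySem.Int.floordiv (m * (m + 1)) 2 - 1) - (m + i - m) + 1 := by
        omega
      rw [op2_foldl_ones, hr]
      have hrg : PySem.List.pyRange (m + 1) (m + 1) 1 = [] :=
        PySem.List.pyRange_one_eq_nil (by omega)
      have hlen : (PySem.List.pyRange 0 (i - 1) 1).length = (i - 1).toNat := by
        rw [PySem.List.length_pyRange_one]; congr 1; omega
      have hcount : (i - 1).toNat = (m + i - m - 1).toNat := by omega
      rw [hlen, hcount, hrg]
      simp
    · -- no break yet: recurse
      have hcond : ¬ (t + (c + 1) + i - 1 ≥ p) := by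
        have := hleast c (le_refl c) (by omega)
        omega
      simp only [op2_loopA, if_neg hcond]
      have hrec := ih (i - 1) (c + 1) (t + (c + 1)) p m (l ++ [c + 1])
        (by omega) (by linear_combination hinv) (by omega) (by omega)
        (by have e : c + 1 + (i - 1) = c + i := by ring
            rw [e]; exact hbrk)
        (by intro j hj1 hj2
            have e : c + 1 + (i - 1) = c + i := by ring
            rw [e]; exact hleast j (by omega) hj2)
      rw [hrec]
      have hsplit : PySem.List.pyRange (c + 1) (m + 1) 1
          = (c + 1) :: PySem.List.pyRange (c + 1 + 1) (m + 1) 1 :=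
        PySem.List.pyRange_one_cons (by omega)
      have hreidx : c + 1 + (i - 1) = c + i := by ring
      rw [hreidx] at hrec ⊢
      rw [hsplit]
      simp

-- A's loop when the break never fires
lemma op2_loopA_full : ∀ (iN : Nat) (i c t p : Int) (l : List Int), i = (iN : Int) →
    2 * t = c * (c + 1) - 2 →
    (∀ k, c ≤ k → k ≤ c + i - 1 → k * (k + 1) + 2 * (c + i) - 2 < 2 * p) →
    (op2_loopA p (PySem.List.pyRange i 0 (-1)) l t c).1 = l ++ PySem.List.pyRange (c + 1) (c + i + 1) 1 ∧
    2 * (op2_loopA p (PySem.List.pyRange i 0 (-1)) l t c).2 = (c + i) * (c + i + 1) - 2 := by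
  intro iN
  induction iN with
  | zero =>
    intro i c t p l hi hinv _
    have hi0 : i = 0 := by omega
    subst hi0
    rw [PySem.List.pyRange_neg_one_eq_nil (by omega)]
    have hrg : PySem.List.pyRange (c + 1) (c + 0 + 1) 1 = [] :=
      PySem.List.pyRange_one_eq_nil (by omega)
    simp only [op2_loopA, hrg]
    constructor
    · simp
    · have e : (c + 0) * (c + 0 + 1) = c * (c + 1) := by ring
      rw [e]; omega
  | succ k ih =>
    intro i c t p l hi hinv hno
    have hipos : (0 : Int) < i := by omega
    rw [PySem.List.pyRange_neg_one_cons hipos]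
    have hcond : ¬ (t + (c + 1) + i - 1 ≥ p) := by
      have := hno c (le_refl c) (by omega)
      omega
    simp only [op2_loopA, if_neg hcond]
    have hrec := ih (i - 1) (c + 1) (t + (c + 1)) p (l ++ [c + 1])
      (by omega) (by linear_combination hinv)
      (by intro j hj1 hj2
          have e : c + 1 + (i - 1) = c + i := by ring
          rw [e]; exact hno j (by omega) (by omega))
    have hreidx : c + 1 + (i - 1) = c + i := by ring
    rw [hreidx] at hrec
    refine ⟨?_, hrec.2⟩
    rw [hrec.1]
    have hsplit : PySem.List.pyRange (c + 1) (c + i + 1) 1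
        = (c + 1) :: PySem.List.pyRange (c + 1 + 1) (c + i + 1) 1 :=
      PySem.List.pyRange_one_cons (by omega)
    rw [hsplit]
    simp

-- ===== VERDICT (by name: the statement is the Claim_ definition above) =====
theorem op2_spec : Claim_equal_op2 := by
  intro n p _hdom
  unfold Spec_op2 op2 op2_alt
  by_cases h1 : p < n - 1
  · rw [if_pos h1,
      if_pos (Or.inr (Or.inl h1) : n < 2 ∨ p < n - 1 ∨ PySem.Int.floordiv ((n - 1) * n) 2 + n - 1 < p)]
  · rw [if_neg h1]
    by_cases h2 : n < 2
    · -- loop body empty; A returns [] either way, B returns []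
      rw [PySem.List.pyRange_neg_one_eq_nil (by omega : n - 1 ≤ 0)]
      simp only [op2_loopA]
      split <;> simp [h2]
    · have hfd' : 2 * PySem.Int.floordiv ((n - 1) * n) 2 = (n - 1) * n := by
        have e : (n - 1) * ((n - 1) + 1) = (n - 1) * n := by ring
        have := op2_two_fdiv (n - 1)
        rw [e] at this; exact this
      by_cases h3 : PySem.Int.floordiv ((n - 1) * n) 2 + n - 1 < p
      · -- no valid break point: both return []
        have hfull := op2_loopA_full (n - 1).toNat (n - 1) 1 0 p []
          (by omega) (by ring)
          (by intro j hj1 hj2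
              have hmono := op2_tri_mono j (n - 1) (by omega) (by omega)
              have e : (n - 1) * ((n - 1) + 1) = (n - 1) * n := by ring
              rw [e] at hmono
              have e2 : 1 + (n - 1) = n := by ring
              rw [e2]
              omega)
        have e2 : 1 + (n - 1) = n := by ring
        rw [e2] at hfull
        have hlt : (op2_loopA p (PySem.List.pyRange (n - 1) 0 (-1)) [] 0 1).2 < p := by
          have e3 : n * (n + 1) = (n - 1) * n + 2 * n := by ring
          omega
        rw [if_pos hlt,
          if_pos (Or.inr (Or.inr h3) : n < 2 ∨ p < n - 1 ∨ PySem.Int.floordiv ((n - 1) * n) 2 + n - 1 < p)]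
      · -- the break fires at m = bsearch result
        rw [if_neg (show ¬(n < 2 ∨ p < n - 1 ∨ PySem.Int.floordiv ((n - 1) * n) 2 + n - 1 < p) by tauto)]
        have hq : 2 * (p - n + 1) ≤ (n - 1) * ((n - 1) + 1) := by
          have e : (n - 1) * ((n - 1) + 1) = (n - 1) * n := by ring
          rw [e]; omega
        obtain ⟨hm1, hm2, hm3, hm4⟩ :=
          op2_bsearch_spec (p - n + 1) (n - 1 - 1).toNat 1 (n - 1) rfl (by omega) hq
        set m := op2_bsearch (p - n + 1) 1 (n - 1) with hm
        have hbrk := op2_loopA_break (n - 1).toNat (n - 1) 1 0 p m []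
          (by omega) (by ring) hm1 (by omega) (by omega)
          (by intro j hj1 hj2
              rcases hm4 with h | h
              · omega
              · have hmono := op2_tri_mono j (m - 1) (by omega) (by omega)
                have e : (m - 1) * ((m - 1) + 1) = (m - 1) * m := by ring
                rw [e] at hmono
                omega)
        rw [hbrk]
        have hnp : ¬ ((p : Int) < p) := by omega
        rw [if_neg hnp]
        have hre : p - (PySem.Int.floordiv (m * (m + 1)) 2 - 1) - (1 + (n - 1) - m) + 1
            = p - PySem.Int.floordiv (m * (m + 1)) 2 - n + m + 2 := by omega
        have hre2 : (1 + (n - 1) - m - 1).toNat = (n - m - 1).toNat := by omega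
        rw [hre, hre2]
        simp
        try rw [← hm]
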